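-- pv_equiv track=rewrite | github.com/fcukss/PyLearn | MSUcoursesDataAnalysisWithPython/weksler/strings.py | parse_poem
-- ===== SOURCE A (Python) =====
-- def parse_poem(text):
--     poem_dict = {}
--     poem_list = text.split()
--     poem_temp =[]
--     for word in poem_list:
--         word = str(word).strip('", !')
--         if not str.islower(word) and len(word)>1:
--             poem_temp.append(word)
--     for i in range(len(poem_temp)):
--          if i%2!=0:
--              poem_dict[poem_temp[i-1]] = poem_temp[i]
--     return poem_dict
-- ===== SOURCE B (Python) =====
-- def parse_poem(text):
--     poem_dict = {}
--     pending = None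
--     for word in text.split():
--         word = word.strip('", !')
--         if not word.islower() and len(word) > 1:
--             if pending is None:
--                 pending = word
--             else:
--                 poem_dict[pending] = word
--                 pending = None
--     return poem_dict
-- ===== Notes on version B (the rewrite author's own statement) =====
-- stated objective: simpler
-- what changed: B replaces A's two passes (build a filtered intermediate list, then a parity-index loop pairing elements by i-1/i) with one fused pass over text.split() that keeps a single pending-key variable and inserts a pair whenever a second surviving word arrives.
import Mathlib
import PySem

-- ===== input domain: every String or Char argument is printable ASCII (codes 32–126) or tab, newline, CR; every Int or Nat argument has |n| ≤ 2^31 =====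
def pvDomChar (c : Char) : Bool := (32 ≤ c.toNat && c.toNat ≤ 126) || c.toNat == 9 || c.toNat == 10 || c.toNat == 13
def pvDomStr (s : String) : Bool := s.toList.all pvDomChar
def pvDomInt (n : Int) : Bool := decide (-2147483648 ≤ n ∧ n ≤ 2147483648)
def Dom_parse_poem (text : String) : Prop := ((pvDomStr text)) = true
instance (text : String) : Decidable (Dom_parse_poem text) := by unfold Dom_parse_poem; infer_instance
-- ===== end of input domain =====

-- B fuses A's two passes (build filtered list, then parity-index pairing loop) into one pass
-- with a pending-key state; same return value, simpler decomposition.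

-- Python str.islower for a string: some lowercase letter present and no uppercase letter (exact on ASCII)
def pvStrIslower (s : String) : Bool :=
  s.toList.any PySem.Chars.islower && s.toList.all (fun c => !PySem.Chars.isupper c)

-- ===== PORT A =====
def parse_poem (text : String) : List (String × String) :=
  let poem_dict : PySem.Dict String String := PySem.Dict.empty
  let poem_list := PySem.Str.split₀ text
  let poem_temp : List String :=
    poem_list.foldl (fun acc word =>
      let word := PySem.Str.stripChars word "\", !"
      if !pvStrIslower word && PySem.Str.len word > 1 then acc ++ [word] else acc) []
  let poem_dict :=
    (PySem.List.pyRange 0 (poem_temp.length : Int) 1).foldl (fun d i =>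
      if PySem.Int.mod i 2 ≠ 0 then
        d.insert (PySem.List.pyGetD poem_temp (i - 1) "") (PySem.List.pyGetD poem_temp i "")
      else d) poem_dict
  poem_dict.items

-- ===== PORT B =====
def parse_poem_alt (text : String) : List (String × String) :=
  let step := fun (st : PySem.Dict String String × Option String) (word : String) =>
    let word := PySem.Str.stripChars word "\", !"
    if !pvStrIslower word && PySem.Str.len word > 1 then
      match st.2 with
      | none => (st.1, some word)
      | some k => (st.1.insert k word, none)
    else st
  ((PySem.Str.split₀ text).foldl step (PySem.Dict.empty, none)).1.items

-- ===== PRECONDITION & SPEC =====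
def Spec_parse_poem (text : String) (out : List (String × String)) : Prop := out = parse_poem_alt text
instance (text : String) (out : List (String × String)) : Decidable (Spec_parse_poem text out) := by unfold Spec_parse_poem; infer_instance

-- ===== CLAIM (what is proved, stated in full; the proofs are below) =====
def Claim_equal_parse_poem : Prop := ∀ (text : String), Dom_parse_poem text → Spec_parse_poem text (parse_poem text)

-- ===== LEMMAS AND PROOFS =====

-- the strip-and-filter step both programs share, as a filterMap function
def pvF (w : String) : Option String :=
  let w' := PySem.Str.stripChars w "\", !"
  if !pvStrIslower w' && PySem.Str.len w' > 1 then some w' else none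

-- consecutive pairing of a list (trailing unpaired element dropped)
def pvPairs : List String → List (String × String)
  | a :: b :: r => (a, b) :: pvPairs r
  | _ => []

-- A's filter-loop body, written through pvF
theorem pvAstep_eq :
    (fun (acc : List String) (word : String) =>
      let word := PySem.Str.stripChars word "\", !"
      if !pvStrIslower word && PySem.Str.len word > 1 then acc ++ [word] else acc)
    = (fun acc word => match pvF word with | some w' => acc ++ [w'] | none => acc) := by
  funext acc w
  simp only [pvF]
  split <;> rfl

-- B's fused loop body, written through pvF
theorem pvBstep_eq :
    (fun (st : PySem.Dict String String × Option String) (word : String) =>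
      let word := PySem.Str.stripChars word "\", !"
      if !pvStrIslower word && PySem.Str.len word > 1 then
        match st.2 with
        | none => (st.1, some word)
        | some k => (st.1.insert k word, none)
      else st)
    = (fun st word => match pvF word with
        | some w' => (match st.2 with
            | none => (st.1, some w')
            | some k => (st.1.insert k w', none))
        | none => st) := by
  funext st w
  simp only [pvF]
  split <;> rfl

-- A's first loop builds exactly the filterMap of pvF
theorem pvA_filter (ws : List String) (acc : List String) :
    ws.foldl (fun acc word => match pvF word with | some w' => acc ++ [w'] | none => acc) acc
    = acc ++ ws.filterMap pvF := by
  induction ws generalizing acc with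
  | nil => simp
  | cons w ws ih =>
    simp only [List.foldl_cons, List.filterMap_cons]
    cases pvF w <;> simp [ih]

-- B's fused step over a list is the plain pairing step over its filterMap
theorem pvB_filter (ws : List String) (st : PySem.Dict String String × Option String) :
    ws.foldl (fun st word => match pvF word with
        | some w' => (match st.2 with
            | none => (st.1, some w')
            | some k => (st.1.insert k w', none))
        | none => st) st
    = (ws.filterMap pvF).foldl (fun st w =>
        match st.2 with
        | none => (st.1, some w)
        | some k => (st.1.insert k w, none)) st := by
  induction ws generalizing st with
  | nil => rfl
  | cons w ws ih =>
    simp only [List.foldl_cons, List.filterMap_cons]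
    cases pvF w <;> simp [ih]

-- the pending-key pairing fold computes the pvPairs fold (the trailing pending key is dropped)
theorem pvB_pairs : ∀ (L : List String) (d : PySem.Dict String String),
    (L.foldl (fun st w =>
        match st.2 with
        | none => (st.1, some w)
        | some k => (st.1.insert k w, none)) (d, (none : Option String))).1
    = (pvPairs L).foldl (fun d p => d.insert p.1 p.2) d
  | [], d => by simp [pvPairs]
  | [a], d => by simp [pvPairs]
  | a :: b :: r, d => by
    simpa [pvPairs] using pvB_pairs r (d.insert a b)

-- A's parity-index loop over List.range equals a fold over pvPairs
theorem pvA_pairs : ∀ (L : List String) (d : PySem.Dict String String),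
    (List.range L.length).foldl (fun d k =>
      if k % 2 = 1 then d.insert (L.getD (k - 1) "") (L.getD k "") else d) d
    = (pvPairs L).foldl (fun d p => d.insert p.1 p.2) d
  | [], d => by simp [pvPairs]
  | [a], d => by simp [pvPairs, List.range_succ]
  | a :: b :: r, d => by
    have hr : List.range (a :: b :: r).length
        = 0 :: 1 :: (List.range r.length).map (fun k => k + 1 + 1) := by
      simp [List.length_cons, List.range_succ_eq_map, List.map_map, Function.comp]
    rw [hr]
    simp only [List.foldl_cons, List.foldl_map]
    norm_num
    rw [PySem.List.foldl_congr_mem (g := fun d k =>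
        if k % 2 = 1 then d.insert (r.getD (k - 1) "") (r.getD k "") else d)]
    · exact pvA_pairs r _
    · intro acc k _
      by_cases hk : k % 2 = 1
      · obtain ⟨m, rfl⟩ : ∃ m, k = m + 1 := ⟨k - 1, by omega⟩
        have h2 : (m + 1 + 1 + 1) % 2 = 1 := by omega
        simp [hk, h2]
      · have h2 : ¬ (k + 1 + 1) % 2 = 1 := by omega
        simp [hk, h2]

-- A's Int-indexed pyRange loop reduces to the Nat-indexed List.range loop
theorem pvA_range (L : List String) (d : PySem.Dict String String) :
    (PySem.List.pyRange 0 (L.length : Int) 1).foldl (fun d i =>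
      if PySem.Int.mod i 2 ≠ 0 then
        d.insert (PySem.List.pyGetD L (i - 1) "") (PySem.List.pyGetD L i "")
      else d) d
    = (List.range L.length).foldl (fun d k =>
      if k % 2 = 1 then d.insert (L.getD (k - 1) "") (L.getD k "") else d) d := by
  rw [PySem.List.pyRange_one]
  simp only [Int.sub_zero, Int.toNat_natCast, List.foldl_map, Int.zero_add]
  apply PySem.List.foldl_congr_mem
  intro acc k _
  have hmod : PySem.Int.mod (k : Int) 2 = ((k % 2 : Nat) : Int) := by
    rw [PySem.Int.mod_eq_emod_of_pos (by norm_num)]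
    omega
  by_cases hk : k % 2 = 1
  · have hc : PySem.Int.mod (k : Int) 2 ≠ 0 := by rw [hmod]; omega
    rw [if_pos hc, if_pos hk]
    have h1 : ((k : Int) - 1) = ((k - 1 : Nat) : Int) := by omega
    rw [h1]
    simp [PySem.List.pyGetD_natCast]
  · have hc : ¬ PySem.Int.mod (k : Int) 2 ≠ 0 := by rw [hmod]; omega
    rw [if_neg hc, if_neg hk]

-- ===== VERDICT (by name: the statement is the Claim_ definition above) =====
theorem parse_poem_spec : Claim_equal_parse_poem := by
  intro text _
  unfold Spec_parse_poem parse_poem parse_poem_alt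
  simp only [pvAstep_eq, pvBstep_eq]
  rw [pvA_filter, pvB_filter, pvB_pairs, List.nil_append, pvA_range, pvA_pairs]
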